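-- pv_equiv track=rewrite | github.com/StevenHosper/brostar-api-requests | src/brostar_api_requests/brostar_api_requests.py | determine_status_quality_control
-- ===== SOURCE A (Python) =====
-- VALIDATION_MAPPING = {
--     "goedgekeurd": 2,
--     "onbeslist": 5,
--     "afgekeurd": 8,
--     "nogNietBeoordeeld": 100,
--     "onbekend": 200,
--     # Any above 100 are corrected values
-- }
--
-- def determine_status_quality_control(value: int | None) -> str:
--     if value is None:
--         return "nogNietBeoordeeld"
--
--     # Sort the items by their value
--     sorted_items = sorted(VALIDATION_MAPPING.items(), key=lambda item: item[1])
--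
--     # Iterate over sorted items
--     for key, threshold in sorted_items:
--         if value < threshold:
--             return key
--
--     # If no valid key is found, return a default value (optional)
--     return "Invalid value"
-- ===== SOURCE B (Python) =====
-- _THRESHOLDS = (2, 5, 8, 100, 200)
-- _LABELS = ("goedgekeurd", "onbeslist", "afgekeurd", "nogNietBeoordeeld", "onbekend", "Invalid value")
--
-- def determine_status_quality_control(value: int | None) -> str:
--     if value is None:
--         return "nogNietBeoordeeld"
--     # binary search (bisect_right) for the first threshold strictly above value
--     lo, hi = 0, len(_THRESHOLDS)
--     while lo < hi:
--         mid = (lo + hi) // 2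
--         if value < _THRESHOLDS[mid]:
--             hi = mid
--         else:
--             lo = mid + 1
--     return _LABELS[lo]
-- ===== Notes on version B (the rewrite author's own statement) =====
-- stated objective: alternative
-- what changed: Replaces the per-call sorted()-over-dict plus first-match linear scan by a hand-written binary search (bisect_right) over the static sorted threshold tuple, indexing a parallel label table.
import Mathlib
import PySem

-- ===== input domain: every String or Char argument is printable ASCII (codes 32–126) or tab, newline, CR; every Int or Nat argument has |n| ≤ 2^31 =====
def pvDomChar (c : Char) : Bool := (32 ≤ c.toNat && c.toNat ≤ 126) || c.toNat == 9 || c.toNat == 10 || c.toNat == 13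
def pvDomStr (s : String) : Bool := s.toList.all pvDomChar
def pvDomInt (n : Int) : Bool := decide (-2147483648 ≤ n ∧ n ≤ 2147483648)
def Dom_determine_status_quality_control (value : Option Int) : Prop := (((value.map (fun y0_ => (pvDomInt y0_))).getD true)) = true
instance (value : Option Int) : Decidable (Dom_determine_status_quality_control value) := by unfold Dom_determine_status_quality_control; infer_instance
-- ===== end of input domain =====

-- B replaces A's per-call sorted()-then-first-match linear scan over the threshold dict by a
-- binary search (bisect_right) over the static sorted threshold tuple plus a label-table
-- lookup (objective: alternative algorithm).


-- ===== PORT A =====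
-- A sorts the dict items by value then scans for the first threshold exceeding value.
def pvSortedItems : List (String × Int) :=
  PySem.List.sorted (key := fun (it : String × Int) => it.2)
    [("goedgekeurd", 2), ("onbeslist", 5), ("afgekeurd", 8), ("nogNietBeoordeeld", 100), ("onbekend", 200)]

def pvScanA (value : Int) : List (String × Int) → String
  | [] => "Invalid value"
  | (key, threshold) :: rest => if value < threshold then key else pvScanA value rest

def determine_status_quality_control (value : Option Int) : String :=
  match value with
  | none => "nogNietBeoordeeld"
  | some v => pvScanA v pvSortedItems

-- ===== PORT B =====
-- B: binary search (bisect_right) over the static sorted thresholds, then index the label table.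
def pvThresholds : List Int := [2, 5, 8, 100, 200]
def pvLabels : List String :=
  ["goedgekeurd", "onbeslist", "afgekeurd", "nogNietBeoordeeld", "onbekend", "Invalid value"]

def pvBisect (value : Int) (lo hi : Nat) : Nat :=
  if lo < hi then
    let mid := (lo + hi) / 2
    if value < pvThresholds.getD mid 0 then pvBisect value lo mid
    else pvBisect value (mid + 1) hi
  else lo
termination_by hi - lo
decreasing_by all_goals omega

def determine_status_quality_control_alt (value : Option Int) : String :=
  match value with
  | none => "nogNietBeoordeeld"
  | some v => pvLabels.getD (pvBisect v 0 pvThresholds.length) ""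

-- ===== PRECONDITION & SPEC =====
def Spec_determine_status_quality_control (value : Option Int) (out : String) : Prop := out = determine_status_quality_control_alt value
instance (value : Option Int) (out : String) : Decidable (Spec_determine_status_quality_control value out) := by unfold Spec_determine_status_quality_control; infer_instance

-- ===== CLAIM (what is proved, stated in full; the proofs are below) =====
def Claim_equal_determine_status_quality_control : Prop := ∀ (value : Option Int), Dom_determine_status_quality_control value → Spec_determine_status_quality_control value (determine_status_quality_control value)

-- ===== LEMMAS AND PROOFS =====

-- one unguarded unfolding step of the binary search
theorem pvBisect_step (value : Int) (lo hi : Nat) :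
    pvBisect value lo hi =
      if lo < hi then
        if value < pvThresholds.getD ((lo + hi) / 2) 0 then pvBisect value lo ((lo + hi) / 2)
        else pvBisect value (((lo + hi) / 2) + 1) hi
      else lo := by
  rw [pvBisect]

theorem pvBisect_nil (v : Int) (n : Nat) : pvBisect v n n = n := by
  rw [pvBisect_step]; simp

theorem pvBisect01 (v : Int) : pvBisect v 0 1 = if v < 2 then 0 else 1 := by
  rw [pvBisect_step]; norm_num [pvThresholds, pvBisect_nil]

theorem pvBisect02 (v : Int) :
    pvBisect v 0 2 = if v < 2 then 0 else if v < 5 then 1 else 2 := by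
  rw [pvBisect_step]; norm_num [pvThresholds, pvBisect01, pvBisect_nil]
  split_ifs <;> omega

theorem pvBisect34 (v : Int) : pvBisect v 3 4 = if v < 100 then 3 else 4 := by
  rw [pvBisect_step]; norm_num [pvThresholds, pvBisect_nil]

theorem pvBisect35 (v : Int) :
    pvBisect v 3 5 = if v < 100 then 3 else if v < 200 then 4 else 5 := by
  rw [pvBisect_step]; norm_num [pvThresholds, pvBisect34, pvBisect_nil]
  split_ifs <;> omega

-- closed evaluation of the search over the five static thresholds
theorem pvBisect_eval (v : Int) :
    pvBisect v 0 5 =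
      if v < 2 then 0 else if v < 5 then 1 else if v < 8 then 2
      else if v < 100 then 3 else if v < 200 then 4 else 5 := by
  rw [pvBisect_step]; norm_num [pvThresholds, pvBisect02, pvBisect35]
  split_ifs <;> omega

-- ===== VERDICT (by name: the statement is the Claim_ definition above) =====
theorem determine_status_quality_control_spec : Claim_equal_determine_status_quality_control := by
  intro value _
  unfold Spec_determine_status_quality_control determine_status_quality_control determine_status_quality_control_alt
  cases value with
  | none => rfl
  | some v =>
    have h : pvSortedItems = [("goedgekeurd", 2), ("onbeslist", 5), ("afgekeurd", 8), ("nogNietBeoordeeld", 100), ("onbekend", 200)] := by decide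
    rw [h]
    have hl : pvThresholds.length = 5 := by decide
    rw [hl]
    dsimp only
    rw [pvBisect_eval]
    simp only [pvScanA]
    split_ifs <;> rfl
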